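-- pv_equiv track=rewrite | github.com/joshwill300/Machine_Learning | perceptron_classifier.py | kernel_p1
-- ===== SOURCE A (Python) =====
-- def count_substrings(s, p):
--     counts = {}
--     for i in range(len(s) - p + 1):
--         substring = s[i:i + p]
--         if substring not in counts:
--             counts[substring] = 1
--         else:
--             counts[substring] += 1
--     return counts
--
-- def kernel_p1(s, t, p):
--     count = 0
--     substrings_s = count_substrings(s, p)
--     substrings_t = count_substrings(t, p)
--
--     # Find all substrings of length p that are in common with t
--     for key in substrings_s:
--         if key in substrings_t:
--             count += substrings_s[key] * substrings_t[key]
--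
--     return count
-- ===== SOURCE B (Python) =====
-- def kernel_p1(s, t, p):
--     # One counting dict (for t only) and a single summing pass over s's windows:
--     # sum over windows w of s of (number of occurrences of w among t's windows)
--     # equals sum over common keys of count_s[k] * count_t[k].
--     counts_t = {}
--     for j in range(len(t) - p + 1):
--         w = t[j:j + p]
--         counts_t[w] = counts_t.get(w, 0) + 1
--     total = 0
--     for i in range(len(s) - p + 1):
--         total += counts_t.get(s[i:i + p], 0)
--     return total
-- ===== Notes on version B (the rewrite author's own statement) =====
-- stated objective: simpler
-- what changed: B builds only one count dict (for t) and replaces A's second dict plus the key-intersection loop by a single pass over s's windows that sums the t-counts directly, using sum_w count_t[w] = sum_k count_s[k]*count_t[k].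
import Mathlib
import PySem

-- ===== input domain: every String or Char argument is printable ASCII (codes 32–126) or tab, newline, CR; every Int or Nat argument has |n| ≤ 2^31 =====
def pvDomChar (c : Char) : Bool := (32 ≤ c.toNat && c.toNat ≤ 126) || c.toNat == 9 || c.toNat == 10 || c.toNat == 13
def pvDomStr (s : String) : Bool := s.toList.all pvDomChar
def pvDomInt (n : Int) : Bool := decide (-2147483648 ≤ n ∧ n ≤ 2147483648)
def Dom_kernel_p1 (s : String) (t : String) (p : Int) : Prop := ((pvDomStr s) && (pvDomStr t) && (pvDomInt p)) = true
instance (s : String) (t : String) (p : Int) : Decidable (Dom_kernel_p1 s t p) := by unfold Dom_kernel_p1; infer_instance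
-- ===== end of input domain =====

-- B builds one count dict (for t) and sums t-counts over s's windows in a single pass,
-- replacing A's two dicts and key-intersection loop (objective: simpler).


-- ===== PORT A =====
def count_substrings (s : String) (p : Int) : PySem.Dict String Int :=
  (PySem.List.pyRange 0 (PySem.Str.len s - p + 1) 1).foldl
    (fun counts i =>
      let substring := PySem.Str.slice s (some i) (some (i + p))
      if counts.contains substring = false then counts.insert substring 1
      else counts.insert substring (counts.getD substring 0 + 1))
    PySem.Dict.empty

def kernel_p1 (s : String) (t : String) (p : Int) : Int :=
  let substrings_s := count_substrings s p
  let substrings_t := count_substrings t p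
  substrings_s.keys.foldl
    (fun count key =>
      if substrings_t.contains key then
        count + substrings_s.getD key 0 * substrings_t.getD key 0
      else count)
    0

-- ===== PORT B =====
def kernel_p1_alt (s : String) (t : String) (p : Int) : Int :=
  let counts_t := (PySem.List.pyRange 0 (PySem.Str.len t - p + 1) 1).foldl
    (fun d j =>
      let w := PySem.Str.slice t (some j) (some (j + p))
      d.insert w (d.getD w 0 + 1))
    PySem.Dict.empty
  (PySem.List.pyRange 0 (PySem.Str.len s - p + 1) 1).foldl
    (fun total i => total + counts_t.getD (PySem.Str.slice s (some i) (some (i + p))) 0)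
    0

-- ===== PRECONDITION & SPEC =====
def Spec_kernel_p1 (s : String) (t : String) (p : Int) (out : Int) : Prop := out = kernel_p1_alt s t p
instance (s : String) (t : String) (p : Int) (out : Int) : Decidable (Spec_kernel_p1 s t p out) := by unfold Spec_kernel_p1; infer_instance

-- ===== CLAIM (what is proved, stated in full; the proofs are below) =====
def Claim_equal_kernel_p1 : Prop := ∀ (s : String) (t : String) (p : Int), Dom_kernel_p1 s t p → Spec_kernel_p1 s t p (kernel_p1 s t p)

-- ===== LEMMAS AND PROOFS =====

-- the list of length-p windows of s, in order
def pvWindows (s : String) (p : Int) : List String :=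
  (PySem.List.pyRange 0 (PySem.Str.len s - p + 1) 1).map
    (fun i => PySem.Str.slice s (some i) (some (i + p)))

-- A's counting loop is Counter(windows)
lemma count_substrings_eq_counter (s : String) (p : Int) :
    count_substrings s p = PySem.Dict.counter (pvWindows s p) := by
  unfold count_substrings pvWindows
  rw [← PySem.Dict.foldl_insert_getD_add_one_eq_counter, List.foldl_map]
  apply PySem.List.foldl_congr_mem
  intro d i _
  show (if d.contains (PySem.Str.slice s (some i) (some (i + p))) = false
        then d.insert (PySem.Str.slice s (some i) (some (i + p))) 1
        else d.insert (PySem.Str.slice s (some i) (some (i + p)))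
          (d.getD (PySem.Str.slice s (some i) (some (i + p))) 0 + 1))
      = d.insert (PySem.Str.slice s (some i) (some (i + p)))
          (d.getD (PySem.Str.slice s (some i) (some (i + p))) 0 + 1)
  by_cases h : d.contains (PySem.Str.slice s (some i) (some (i + p))) = false
  · rw [if_pos h, PySem.Dict.getD_of_not_contains _ _ h]
    norm_num
  · simp [h]

-- B's counting loop is Counter(windows)
lemma alt_dict_eq_counter (t : String) (p : Int) :
    (PySem.List.pyRange 0 (PySem.Str.len t - p + 1) 1).foldl
      (fun d j =>
        let w := PySem.Str.slice t (some j) (some (j + p))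
        d.insert w (d.getD w 0 + 1))
      PySem.Dict.empty = PySem.Dict.counter (pvWindows t p) := by
  unfold pvWindows
  rw [← PySem.Dict.foldl_insert_getD_add_one_eq_counter, List.foldl_map]

-- discard on a Nodup list: the sum drops exactly the (at most one) occurrence of x
lemma sum_map_discard (S : List String) (x : String) (g : String → Int) (hnd : S.Nodup) :
    ((PySem.Set.discard S x).map g).sum
      = (S.map g).sum - (if x ∈ S then g x else 0) := by
  induction S with
  | nil => simp [PySem.Set.discard]
  | cons a S ih =>
    have hnd' := hnd.of_cons
    by_cases hax : a = x
    · subst hax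
      have hx : a ∉ S := (List.nodup_cons.mp hnd).1
      have h1 : PySem.Set.discard (a :: S) a = PySem.Set.discard S a := by
        simp [PySem.Set.discard]
      rw [h1, ih hnd']
      simp [hx]
    · have h1 : PySem.Set.discard (a :: S) x = a :: PySem.Set.discard S x := by
        simp only [PySem.Set.discard, List.filter_cons]
        rw [if_pos (by simp [hax])]
      have hxa : x ≠ a := fun h => hax h.symm
      rw [h1, List.map_cons, List.sum_cons, ih hnd', List.map_cons, List.sum_cons,
        if_congr (show (x ∈ a :: S) ↔ x ∈ S by simp [List.mem_cons, hxa]) rfl rfl]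
      ring

-- weighted sum over distinct elements = plain sum over the list
lemma sum_count_mul (xs : List String) (f : String → Int) :
    ((PySem.Set.ofList xs).map (fun k => (xs.count k : Int) * f k)).sum
      = (xs.map f).sum := by
  induction xs with
  | nil => simp [PySem.Set.ofList]
  | cons x xs ih =>
    rw [PySem.Set.ofList_cons]
    simp only [List.map_cons, List.sum_cons]
    have hcount : ∀ k ∈ PySem.Set.discard (PySem.Set.ofList xs) x,
        ((x :: xs).count k : Int) * f k = (xs.count k : Int) * f k := by
      intro k hk
      have hne : k ≠ x := ((PySem.Set.mem_discard _ _ _).mp hk).2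
      simp only [List.count_cons]
      rw [if_neg (fun hxk => hne (beq_iff_eq.mp hxk).symm)]
      norm_num
    rw [List.map_congr_left hcount,
        sum_map_discard _ _ _ (PySem.Set.nodup_ofList xs)]
    have hif : (if x ∈ PySem.Set.ofList xs then (xs.count x : Int) * f x else 0)
        = (xs.count x : Int) * f x := by
      by_cases hx : x ∈ xs
      · simp [PySem.Set.mem_ofList, hx]
      · simp [PySem.Set.mem_ofList, hx, List.count_eq_zero_of_not_mem hx]
    rw [hif, ih, List.count_cons_self]
    push_cast
    ring

-- ===== VERDICT (by name: the statement is the Claim_ definition above) =====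
theorem kernel_p1_spec : Claim_equal_kernel_p1 := by
  intro s t p _
  unfold Spec_kernel_p1 kernel_p1 kernel_p1_alt
  rw [count_substrings_eq_counter, count_substrings_eq_counter, alt_dict_eq_counter]
  -- B side: fold over pyRange is the sum of t-window counts over s's windows
  have hB : (PySem.List.pyRange 0 (PySem.Str.len s - p + 1) 1).foldl
      (fun total i => total + (PySem.Dict.counter (pvWindows t p)).getD
        (PySem.Str.slice s (some i) (some (i + p))) 0) 0
      = ((pvWindows s p).map (fun w => ((pvWindows t p).count w : Int))).sum := by
    trans ((PySem.List.pyRange 0 (PySem.Str.len s - p + 1) 1).foldl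
      (fun total i =>
        total + ((pvWindows t p).count (PySem.Str.slice s (some i) (some (i + p))) : Int)) 0)
    · apply PySem.List.foldl_congr_mem
      intro acc i _
      rw [PySem.Dict.getD_counter]
    · rw [PySem.List.foldl_add, zero_add]
      rw [show pvWindows s p = (PySem.List.pyRange 0 (PySem.Str.len s - p + 1) 1).map
            (fun i => PySem.Str.slice s (some i) (some (i + p))) from rfl, List.map_map]
      rfl
  -- A side: fold over the keys is the weighted sum over distinct s-windows
  have hA : (PySem.Dict.counter (pvWindows s p)).keys.foldl
      (fun count key =>
        if (PySem.Dict.counter (pvWindows t p)).contains key then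
          count + (PySem.Dict.counter (pvWindows s p)).getD key 0 *
            (PySem.Dict.counter (pvWindows t p)).getD key 0
        else count) 0
      = ((PySem.Set.ofList (pvWindows s p)).map
          (fun k => ((pvWindows s p).count k : Int) * ((pvWindows t p).count k : Int))).sum := by
    rw [PySem.Dict.keys_counter]
    trans ((PySem.Set.ofList (pvWindows s p)).foldl
      (fun c k => c + ((pvWindows s p).count k : Int) * ((pvWindows t p).count k : Int)) 0)
    swap
    · rw [PySem.List.foldl_add, zero_add]
    apply PySem.List.foldl_congr_mem
    intro c k _
    by_cases hk : (PySem.Dict.counter (pvWindows t p)).contains k = true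
    · simp [hk, PySem.Dict.getD_counter]
    · have hk' : k ∉ pvWindows t p := by
        intro hmem
        exact hk (by simp [PySem.Dict.contains_counter, hmem])
      simp [hk, List.count_eq_zero_of_not_mem hk']
  rw [hA, hB, sum_count_mul]
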